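-- pv_equiv track=rewrite | github.com/tnq177/dsa-for-fun | usaco/subset.py | count
-- ===== SOURCE A (Python) =====
-- def count(N):
--     total = N * (N + 1) // 2
--     if total % 2 != 0:
--         return 0
--
--     total = total // 2
--     dp = [[1] * (N + 1)] + [[0] * (N + 1) for _ in range(total)]
--     for amount in range(1, total + 1):
--         for num in range(N + 1):
--             if amount < num:
--                 dp[amount][num] = dp[amount][num - 1]
--             else:
--                 dp[amount][num] = dp[amount][num - 1] + dp[amount - num][num - 1]
--
--     return dp[-1][-1] // 2
-- ===== SOURCE B (Python) =====
-- def count(N):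
--     total = N * (N + 1) // 2
--     if total % 2 != 0:
--         return 0
--     half = total // 2
--     # Kronecker substitution: evaluate prod_{k=1..N} (1 + x^k) at x = 2^W with
--     # W = N + 1 bits per coefficient (every coefficient is at most 2^N, so no carry
--     # ever crosses a W-bit lane), then read the coefficient of x^half off the bits.
--     W = N + 1
--     P = 1
--     for k in range(1, N + 1):
--         P += P << (W * k)
--     return ((P >> (W * half)) & ((1 << W) - 1)) // 2
-- ===== Notes on version B (the rewrite author's own statement) =====
-- stated objective: alternative
-- what changed: B discards A's (total/2+1)x(N+1) DP table entirely and instead evaluates the generating product prod_{k=1..N}(1+x^k) by Kronecker substitution x=2^(N+1): one big integer built by N shift-and-add steps packs every subset-sum count into its own (N+1)-bit lane, and the answer is read off with one shift and mask.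
import Mathlib
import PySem

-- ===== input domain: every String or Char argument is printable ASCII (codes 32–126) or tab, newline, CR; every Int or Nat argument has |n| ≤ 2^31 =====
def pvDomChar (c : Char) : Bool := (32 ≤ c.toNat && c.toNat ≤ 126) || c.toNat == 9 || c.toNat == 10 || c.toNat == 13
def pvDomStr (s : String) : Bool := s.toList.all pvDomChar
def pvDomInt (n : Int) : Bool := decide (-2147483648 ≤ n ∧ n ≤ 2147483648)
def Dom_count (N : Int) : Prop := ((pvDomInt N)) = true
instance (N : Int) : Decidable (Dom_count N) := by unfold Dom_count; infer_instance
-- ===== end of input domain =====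

-- B replaces A's 2-D DP table by Kronecker substitution: the product ∏(1+x^k) is evaluated
-- at x = 2^(N+1), packing all subset-sum counts into one big integer built by N shift-and-add
-- steps, and the target coefficient is read off by shift and mask.

-- ===== PORT A =====
-- A's Python lists are ported as Lean Arrays (constant-time indexing, like CPython lists).
-- pyIdx/aGetRow/aGetInt implement Python's xs[i] including negative-index wraparound; they are
-- exact whenever -len(xs) <= i < len(xs), which holds at every read A performs on inputs in
-- Pre_count (outside it Python's IndexError corresponds to the default value, never reached here).
def pyIdx (len : Nat) (i : Int) : Nat := if 0 ≤ i then i.toNat else len - (-i).toNat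
def aGetRow (dp : Array (Array Int)) (i : Int) : Array Int := dp.getD (pyIdx dp.size i) #[]
def aGetInt (row : Array Int) (i : Int) : Int := row.getD (pyIdx row.size i) 0

-- dp[amount][num] = v : read the row dp[amount], compute v, write the updated row back.
def innerStepA (amount : Int) (dp : Array (Array Int)) (num : Int) : Array (Array Int) :=
  let row := aGetRow dp amount
  let v :=
    if amount < num then aGetInt row (num - 1)
    else aGetInt row (num - 1) + aGetInt (aGetRow dp (amount - num)) (num - 1)
  dp.setIfInBounds (pyIdx dp.size amount) (row.setIfInBounds (pyIdx row.size num) v)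

def outerStepA (N : Int) (dp : Array (Array Int)) (amount : Int) : Array (Array Int) :=
  (PySem.List.pyRange 0 (N + 1) 1).foldl (innerStepA amount) dp

def count (N : Int) : Int :=
  let total := PySem.Int.floordiv (N * (N + 1)) 2
  if PySem.Int.mod total 2 ≠ 0 then 0
  else
    let total2 := PySem.Int.floordiv total 2
    let dp : Array (Array Int) :=
      ((PySem.List.pyRepeat [(1 : Int)] (N + 1)).toArray ::
        (PySem.List.pyRange 0 total2 1).map
          (fun _ => (PySem.List.pyRepeat [(0 : Int)] (N + 1)).toArray)).toArray
    let dp := (PySem.List.pyRange 1 (total2 + 1) 1).foldl (outerStepA N) dp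
    PySem.Int.floordiv (aGetInt (aGetRow dp (-1)) (-1)) 2

-- ===== PORT B =====
-- Python's  <<, >>, &  are Lean's  <<<, >>>, PySem.Int.band  (exact; PYSEM.md).  The shift
-- amounts W*k and W*half are nonnegative on every input in Pre_count, where .toNat is exact
-- (outside Pre_count Python raises ValueError on a negative shift count).
def count_alt (N : Int) : Int :=
  let total := PySem.Int.floordiv (N * (N + 1)) 2
  if PySem.Int.mod total 2 ≠ 0 then 0
  else
    let half := PySem.Int.floordiv total 2
    let W := N + 1
    let P := (PySem.List.pyRange 1 (N + 1) 1).foldl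
      (fun (P : Int) k => P + (P <<< ((W * k).toNat))) 1
    PySem.Int.floordiv
      (PySem.Int.band (P >>> ((W * half).toNat)) (((1 : Int) <<< W.toNat) - 1)) 2

-- ===== PRECONDITION & SPEC =====
-- Pre_ excludes exactly the negative N whose triangle number is even: there A's dp[-1][-1]
-- hits an empty row and raises IndexError (and B raises on a negative shift count); A returns
-- normally everywhere else.
def Pre_count (N : Int) : Prop :=
  0 ≤ N ∨ PySem.Int.mod (PySem.Int.floordiv (N * (N + 1)) 2) 2 ≠ 0
instance (N : Int) : Decidable (Pre_count N) := by unfold Pre_count; infer_instance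

def pvWitness_count : Int := 4

def Spec_count (N : Int) (out : Int) : Prop := out = count_alt N
instance (N : Int) (out : Int) : Decidable (Spec_count N out) := by unfold Spec_count; infer_instance

-- ===== CLAIM (what is proved, stated in full; the proofs are below) =====
def Claim_equal_count : Prop := ∀ (N : Int), Dom_count N → Pre_count N → Spec_count N (count N)

-- ===== LEMMAS AND PROOFS =====

-- Aent s k = number of subsets of {1..k} with sum s (A's table entry / B's packed coefficient).
def Aent : ℕ → ℕ → ℤ
  | i, 0 => if i = 0 then 1 else 0
  | i, j + 1 => if i = 0 then 1 else Aent i j + (if j + 1 ≤ i then Aent (i - (j + 1)) j else 0)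

theorem Aent_zero_left (j : ℕ) : Aent 0 j = 1 := by cases j <;> simp [Aent]
theorem Aent_succ_zero (i : ℕ) : Aent (i + 1) 0 = 0 := by simp [Aent]
theorem Aent_succ_succ (i j : ℕ) :
    Aent (i + 1) (j + 1) = Aent (i + 1) j + (if j + 1 ≤ i + 1 then Aent (i + 1 - (j + 1)) j else 0) := by
  simp [Aent]

theorem getD_map_range {α : Type} (m s : ℕ) (f : ℕ → α) (d : α) :
    ((List.range m).map f).getD s d = if s < m then f s else d := by
  by_cases h : s < m
  · simp [List.getD, h]
  · simp [List.getD, h]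

theorem set_map_range {α : Type} (m j : ℕ) (f : ℕ → α) (v : α) :
    ((List.range m).map f).set j v = (List.range m).map (fun t => if t = j then v else f t) := by
  apply List.ext_getElem
  · simp
  · intro i h1 h2
    simp only [List.getElem_set, List.getElem_map, List.getElem_range]
    by_cases h : i = j
    · subst h; simp
    · simp [h, Ne.symm h]

-- bridge: Array-side Python indexing in terms of PySem's list indexing
theorem arrGetD_toArray {α : Type} (l : List α) (t : ℕ) (d : α) :
    l.toArray.getD t d = l.getD t d := by
  simp [Array.getD_eq_getD_getElem?, List.getD]

theorem pyIdx_natCast (len : Nat) (t : ℕ) : pyIdx len (t : Int) = t := by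
  simp [pyIdx]

theorem aGetInt_toArray (l : List Int) (i : Int)
    (h1 : -(l.length : Int) ≤ i) (h2 : i < (l.length : Int)) :
    aGetInt l.toArray i = PySem.List.pyGetD l i 0 := by
  unfold aGetInt pyIdx
  by_cases hi : 0 ≤ i
  · rw [if_pos hi, PySem.List.pyGetD_eq_getElem l 0 hi h2]
    simp only [arrGetD_toArray]
    exact List.getD_eq_getElem l 0 (by omega)
  · rw [if_neg (by omega),
        show i = -(((-i).toNat : ℕ) : Int) by omega,
        PySem.List.pyGetD_neg_natCast l (-i).toNat 0 (by omega) (by omega)]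
    simp only [List.size_toArray, arrGetD_toArray, neg_neg, Int.toNat_natCast]
    exact List.getD_eq_getElem l 0 (by omega)

def arr2 (X : List (List Int)) : Array (Array Int) := (X.map List.toArray).toArray

theorem aGetRow_arr2 (X : List (List Int)) (i : Int)
    (h1 : -(X.length : Int) ≤ i) (h2 : i < (X.length : Int)) :
    aGetRow (arr2 X) i = (PySem.List.pyGetD X i []).toArray := by
  unfold aGetRow arr2 pyIdx
  by_cases hi : 0 ≤ i
  · rw [if_pos hi, PySem.List.pyGetD_eq_getElem X [] hi h2]
    simp only [arrGetD_toArray]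
    rw [List.getD_eq_getElem _ _ (by simp; omega), List.getElem_map]
  · rw [if_neg (by omega),
        show i = -(((-i).toNat : ℕ) : Int) by omega,
        PySem.List.pyGetD_neg_natCast X (-i).toNat [] (by omega) (by omega)]
    simp only [List.size_toArray, List.length_map, arrGetD_toArray, neg_neg, Int.toNat_natCast]
    rw [List.getD_eq_getElem _ _ (by simp; omega), List.getElem_map]

theorem setIfInBounds_toArray {α : Type} (l : List α) (t : ℕ) (v : α) :
    l.toArray.setIfInBounds t v = (l.set t v).toArray := by
  rw [← Array.toList_inj]
  simp

theorem set_arr2 (X : List (List Int)) (t : ℕ) (l : List Int) :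
    (arr2 X).setIfInBounds t l.toArray = arr2 (X.set t l) := by
  unfold arr2
  rw [← Array.toList_inj]
  simp [List.map_set]

def rowA (n i : ℕ) : List Int := (List.range (n + 1)).map (fun t => Aent i t)
def prefRow (n i j : ℕ) : List Int :=
  (List.range (n + 1)).map (fun t => if t < j then Aent i t else 0)
def TabP (n hh a j : ℕ) : List (List Int) :=
  List.replicate (n + 1) 1 ::
    (List.range hh).map (fun t =>
      if t + 1 < a then rowA n (t + 1)
      else if t + 1 = a then prefRow n a j
      else List.replicate (n + 1) 0)

theorem prefRow_length (n i j : ℕ) : (prefRow n i j).length = n + 1 := by simp [prefRow]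
theorem TabP_length (n hh a j : ℕ) : (TabP n hh a j).length = hh + 1 := by simp [TabP]

theorem pyGetD_prefRow_pred (n i j : ℕ) (hj : j ≤ n) :
    PySem.List.pyGetD (prefRow n i j) ((j : Int) - 1) 0 =
      if j = 0 then 0 else Aent i (j - 1) := by
  rcases Nat.eq_zero_or_pos j with hj0 | hj0
  · subst hj0
    rw [show ((0 : ℕ) : Int) - 1 = -1 by ring,
        PySem.List.pyGetD_neg_one (prefRow n i 0) 0 (by simp [prefRow]),
        List.getLast_eq_getElem]
    simp [prefRow]
  · rw [show (j : Int) - 1 = ((j - 1 : ℕ) : Int) by omega, PySem.List.pyGetD_natCast]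
    unfold prefRow
    rw [getD_map_range]
    simp [show j - 1 < n + 1 by omega, show j - 1 < j by omega, show j ≠ 0 by omega]

theorem aGetInt_prefRow_pred (n i j : ℕ) (hj : j ≤ n) :
    aGetInt (prefRow n i j).toArray ((j : Int) - 1) =
      if j = 0 then 0 else Aent i (j - 1) := by
  rw [aGetInt_toArray _ _ (by rw [prefRow_length]; omega) (by rw [prefRow_length]; omega)]
  exact pyGetD_prefRow_pred n i j hj

-- row a of the partial table
theorem TabP_row_a (n hh a j : ℕ) (ha1 : 1 ≤ a) (ha2 : a ≤ hh) :
    PySem.List.pyGetD (TabP n hh a j) (a : Int) [] = prefRow n a j := by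
  obtain ⟨b, rfl⟩ : ∃ b, a = b + 1 := ⟨a - 1, by omega⟩
  rw [PySem.List.pyGetD_natCast]
  unfold TabP
  rw [List.getD_cons_succ, getD_map_range]
  simp [show b < hh by omega]

-- earlier rows (i < a) are final
theorem TabP_row_lt (n hh a j i : ℕ) (hi : i < a) (ha2 : a ≤ hh) :
    PySem.List.pyGetD (TabP n hh a j) (i : Int) [] =
      if i = 0 then List.replicate (n + 1) 1 else rowA n i := by
  rw [PySem.List.pyGetD_natCast]
  rcases Nat.eq_zero_or_pos i with rfl | hi0
  · simp [TabP]
  · obtain ⟨c, rfl⟩ : ∃ c, i = c + 1 := ⟨i - 1, by omega⟩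
    unfold TabP
    rw [List.getD_cons_succ, getD_map_range]
    simp [show c < hh by omega, show c + 1 < a by omega]

-- the value A stores into dp[amount][num] is the spec entry Aent amount num
theorem val_eq (n hh a j : ℕ) (ha1 : 1 ≤ a) (ha2 : a ≤ hh) (hj : j ≤ n) :
    (if (a : Int) < (j : Int) then
        aGetInt (aGetRow (arr2 (TabP n hh a j)) (a : Int)) ((j : Int) - 1)
     else
        aGetInt (aGetRow (arr2 (TabP n hh a j)) (a : Int)) ((j : Int) - 1) +
          aGetInt (aGetRow (arr2 (TabP n hh a j)) ((a : Int) - (j : Int))) ((j : Int) - 1))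
      = Aent a j := by
  have hrow : aGetRow (arr2 (TabP n hh a j)) (a : Int) = (prefRow n a j).toArray := by
    rw [aGetRow_arr2 _ _ (by rw [TabP_length]; omega) (by rw [TabP_length]; omega),
        TabP_row_a n hh a j ha1 ha2]
  rw [hrow]
  obtain ⟨b, rfl⟩ : ∃ b, a = b + 1 := ⟨a - 1, by omega⟩
  rcases Nat.eq_zero_or_pos j with rfl | hj0
  · rw [if_neg (by omega), aGetInt_prefRow_pred n _ 0 (by omega)]
    rw [show ((b + 1 : ℕ) : Int) - ((0 : ℕ) : Int) = ((b + 1 : ℕ) : Int) by omega, hrow]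
    rw [aGetInt_prefRow_pred n _ 0 (by omega)]
    simp [Aent_succ_zero]
  · obtain ⟨c, rfl⟩ : ∃ c, j = c + 1 := ⟨j - 1, by omega⟩
    rw [aGetInt_prefRow_pred n _ (c + 1) hj]
    by_cases hlt : b + 1 < c + 1
    · rw [if_pos (by omega : ((b + 1 : ℕ) : Int) < ((c + 1 : ℕ) : Int))]
      rw [Aent_succ_succ]
      simp [show ¬ (c + 1 ≤ b + 1) by omega]
    · rw [if_neg (by omega : ¬ ((b + 1 : ℕ) : Int) < ((c + 1 : ℕ) : Int))]
      rw [show ((b + 1 : ℕ) : Int) - ((c + 1 : ℕ) : Int) = ((b + 1 - (c + 1) : ℕ) : Int) by omega]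
      rw [aGetRow_arr2 _ _ (by rw [TabP_length]; omega) (by rw [TabP_length]; omega)]
      rw [TabP_row_lt n hh (b + 1) (c + 1) (b + 1 - (c + 1)) (by omega) ha2]
      have hlen :
          (if b + 1 - (c + 1) = 0 then List.replicate (n + 1) (1 : ℤ)
           else rowA n (b + 1 - (c + 1))).length = n + 1 := by
        split_ifs <;> simp [rowA]
      rw [aGetInt_toArray _ _ (by rw [hlen]; omega) (by rw [hlen]; omega)]
      have hread :
          PySem.List.pyGetD
            (if b + 1 - (c + 1) = 0 then List.replicate (n + 1) 1 else rowA n (b + 1 - (c + 1)))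
            (((c + 1 : ℕ) : Int) - 1) 0 = Aent (b + 1 - (c + 1)) c := by
        rw [show ((c + 1 : ℕ) : Int) - 1 = ((c : ℕ) : Int) by omega, PySem.List.pyGetD_natCast]
        by_cases hz : b + 1 - (c + 1) = 0
        · rw [if_pos hz, hz]
          have hc : c < n + 1 := by omega
          simp [List.getD, hc, Aent_zero_left]
        · rw [if_neg hz]
          unfold rowA
          rw [getD_map_range, if_pos (by omega)]
      rw [hread, Aent_succ_succ]
      simp [show c + 1 ≤ b + 1 by omega]

-- writing Aent a j into slot (a, j) advances the partial row by one
theorem tabP_write (n hh a j : ℕ) (ha1 : 1 ≤ a) (ha2 : a ≤ hh) :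
    (TabP n hh a j).set a ((prefRow n a j).set j (Aent a j)) = TabP n hh a (j + 1) := by
  unfold prefRow
  rw [set_map_range]
  unfold TabP
  obtain ⟨b, rfl⟩ : ∃ b, a = b + 1 := ⟨a - 1, by omega⟩
  rw [List.set_cons_succ, set_map_range]
  congr 1
  apply List.map_congr_left
  intro t ht
  by_cases hteq : t = b
  · subst hteq
    rw [if_pos rfl, if_neg (by omega : ¬ (t + 1 < t + 1)), if_pos rfl]
    unfold prefRow
    apply List.map_congr_left
    intro u hu
    by_cases huj : u = j
    · subst huj; simp
    · simp only [if_neg huj]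
      by_cases h2 : u < j
      · rw [if_pos h2, if_pos (by omega)]
      · rw [if_neg h2, if_neg (by omega)]
  · rw [if_neg hteq]
    have h1 : (t + 1 = b + 1) = False := by simp; omega
    by_cases h2 : t + 1 < b + 1
    · simp [h2]
    · simp only [if_neg h2, h1, if_false]

theorem innerStep_eq (n hh a j : ℕ) (ha1 : 1 ≤ a) (ha2 : a ≤ hh) (hj : j ≤ n) :
    innerStepA (a : Int) (arr2 (TabP n hh a j)) (j : Int) = arr2 (TabP n hh a (j + 1)) := by
  show (arr2 (TabP n hh a j)).setIfInBounds (pyIdx (arr2 (TabP n hh a j)).size (a : Int))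
        ((aGetRow (arr2 (TabP n hh a j)) (a : Int)).setIfInBounds
          (pyIdx (aGetRow (arr2 (TabP n hh a j)) (a : Int)).size (j : Int))
          (if (a : Int) < (j : Int) then
              aGetInt (aGetRow (arr2 (TabP n hh a j)) (a : Int)) ((j : Int) - 1)
           else
              aGetInt (aGetRow (arr2 (TabP n hh a j)) (a : Int)) ((j : Int) - 1) +
                aGetInt (aGetRow (arr2 (TabP n hh a j)) ((a : Int) - (j : Int))) ((j : Int) - 1))) =
      arr2 (TabP n hh a (j + 1))
  rw [val_eq n hh a j ha1 ha2 hj]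
  have hrow : aGetRow (arr2 (TabP n hh a j)) (a : Int) = (prefRow n a j).toArray := by
    rw [aGetRow_arr2 _ _ (by rw [TabP_length]; omega) (by rw [TabP_length]; omega),
        TabP_row_a n hh a j ha1 ha2]
  rw [hrow, pyIdx_natCast, pyIdx_natCast,
      setIfInBounds_toArray (prefRow n a j) j (Aent a j), set_arr2,
      tabP_write n hh a j ha1 ha2]

def TabF (n hh a : ℕ) : List (List Int) :=
  List.replicate (n + 1) 1 ::
    (List.range hh).map (fun t =>
      if t + 1 ≤ a then rowA n (t + 1) else List.replicate (n + 1) 0)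

theorem prefRow_zero (n i : ℕ) : prefRow n i 0 = List.replicate (n + 1) 0 := by
  simp [prefRow, List.map_const']

theorem TabF_eq_TabP_zero (n hh a : ℕ) : TabF n hh a = TabP n hh (a + 1) 0 := by
  unfold TabF TabP
  congr 1
  apply List.map_congr_left
  intro t ht
  rw [prefRow_zero]
  by_cases h : t + 1 ≤ a
  · rw [if_pos h, if_pos (by omega)]
  · rw [if_neg h, if_neg (by omega : ¬ t + 1 < a + 1)]
    simp

theorem prefRow_full (n i : ℕ) : prefRow n i (n + 1) = rowA n i := by
  unfold prefRow rowA
  apply List.map_congr_left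
  intro t ht
  simp [List.mem_range.mp ht]

theorem TabP_last (n hh a : ℕ) : TabP n hh a (n + 1) = TabF n hh a := by
  unfold TabF TabP
  congr 1
  apply List.map_congr_left
  intro t ht
  rw [prefRow_full]
  by_cases h1 : t + 1 < a
  · rw [if_pos h1, if_pos (by omega)]
  · by_cases h2 : t + 1 = a
    · rw [if_neg h1, if_pos h2, if_pos (by omega), h2]
    · rw [if_neg h1, if_neg h2, if_neg (by omega)]

theorem innerFold_eq (n hh a : ℕ) (ha1 : 1 ≤ a) (ha2 : a ≤ hh) :
    ∀ m, m ≤ n + 1 →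
      (PySem.List.pyRange 0 (m : Int) 1).foldl (innerStepA (a : Int)) (arr2 (TabP n hh a 0)) =
        arr2 (TabP n hh a m) := by
  intro m
  induction m with
  | zero => intro _; simp [PySem.List.pyRange_one_eq_nil]
  | succ m ih =>
      intro hm
      rw [show ((m + 1 : ℕ) : Int) = (m : Int) + 1 by push_cast; ring,
          PySem.List.pyRange_one_succ_right (by positivity), List.foldl_append,
          ih (by omega)]
      simpa using innerStep_eq n hh a m ha1 ha2 (by omega)

theorem outerFold_eq (n hh : ℕ) :
    ∀ a, a ≤ hh →
      (PySem.List.pyRange 1 ((a : Int) + 1) 1).foldl (outerStepA (n : Int)) (arr2 (TabF n hh 0)) =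
        arr2 (TabF n hh a) := by
  intro a
  induction a with
  | zero => intro _; simp [PySem.List.pyRange_one_eq_nil]
  | succ a ih =>
      intro ha
      rw [show ((a + 1 : ℕ) : Int) + 1 = ((a : Int) + 1) + 1 by push_cast; ring,
          PySem.List.pyRange_one_succ_right (by omega), List.foldl_append,
          ih (by omega)]
      show outerStepA (n : Int) (arr2 (TabF n hh a)) ((a : Int) + 1) = arr2 (TabF n hh (a + 1))
      unfold outerStepA
      rw [show ((n : Int) + 1) = ((n + 1 : ℕ) : Int) by push_cast; ring,
          TabF_eq_TabP_zero,
          show ((a : Int) + 1) = ((a + 1 : ℕ) : Int) by push_cast; ring,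
          innerFold_eq n hh (a + 1) (by omega) (by omega) (n + 1) le_rfl,
          TabP_last]

theorem map_range_const {α : Type} (m : ℕ) (c : α) :
    (List.range m).map (fun _ => c) = List.replicate m c := by
  simp [List.map_const']

theorem TabF_full (n hh : ℕ) : TabF n hh hh = (List.range (hh + 1)).map (rowA n) := by
  unfold TabF
  rw [List.range_succ_eq_map, List.map_cons, List.map_map]
  congr 1
  · unfold rowA
    rw [← map_range_const (n + 1) (1 : ℤ)]
    apply List.map_congr_left
    intro t _
    exact (Aent_zero_left t).symm
  · apply List.map_congr_left
    intro t ht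
    simp [show t + 1 ≤ hh from List.mem_range.mp ht, Function.comp, Nat.succ_eq_add_one]

theorem getLast_map_range {α : Type} (m : ℕ) (f : ℕ → α) (h : (List.range (m + 1)).map f ≠ []) :
    ((List.range (m + 1)).map f).getLast h = f m := by
  rw [List.getLast_eq_getElem]
  simp

theorem tabF_extract (n hh : ℕ) :
    aGetInt (aGetRow (arr2 (TabF n hh hh)) (-1)) (-1) = Aent hh n := by
  rw [TabF_full,
      aGetRow_arr2 _ _ (by simp) (by simp),
      PySem.List.pyGetD_neg_one _ _ (by simp), getLast_map_range]
  unfold rowA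
  rw [aGetInt_toArray _ _ (by simp) (by simp),
      PySem.List.pyGetD_neg_one _ _ (by simp), getLast_map_range]

theorem half_nonneg (N : Int) (hN : 0 ≤ N) :
    0 ≤ PySem.Int.floordiv (PySem.Int.floordiv (N * (N + 1)) 2) 2 := by
  have h1 : 0 ≤ PySem.Int.floordiv (N * (N + 1)) 2 := by
    rw [PySem.Int.floordiv_eq_ediv_of_pos (by omega)]
    exact Int.ediv_nonneg (by positivity) (by omega)
  rw [PySem.Int.floordiv_eq_ediv_of_pos (by omega)]
  exact Int.ediv_nonneg h1 (by omega)

theorem count_eq_Aent (N : Int) (hN : 0 ≤ N)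
    (he : PySem.Int.mod (PySem.Int.floordiv (N * (N + 1)) 2) 2 = 0) :
    count N =
      PySem.Int.floordiv
        (Aent (PySem.Int.floordiv (PySem.Int.floordiv (N * (N + 1)) 2) 2).toNat N.toNat) 2 := by
  have hcond : ¬ (PySem.Int.mod (PySem.Int.floordiv (N * (N + 1)) 2) 2 ≠ 0) := not_not_intro he
  unfold count
  rw [if_neg hcond]
  set n : ℕ := N.toNat with hn
  set hh : ℕ := (PySem.Int.floordiv (PySem.Int.floordiv (N * (N + 1)) 2) 2).toNat with hhh
  have hNn : N = (n : Int) := by omega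
  have hhalf : PySem.Int.floordiv (PySem.Int.floordiv (N * (N + 1)) 2) 2 = (hh : Int) := by
    have := half_nonneg N hN; omega
  show PySem.Int.floordiv
      (aGetInt
        (aGetRow
          ((PySem.List.pyRange 1 (PySem.Int.floordiv (PySem.Int.floordiv (N * (N + 1)) 2) 2 + 1) 1).foldl
            (outerStepA N)
            (((PySem.List.pyRepeat [(1 : Int)] (N + 1)).toArray ::
              (PySem.List.pyRange 0 (PySem.Int.floordiv (PySem.Int.floordiv (N * (N + 1)) 2) 2) 1).map
                (fun _ => (PySem.List.pyRepeat [(0 : Int)] (N + 1)).toArray)).toArray))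
          (-1))
        (-1)) 2 = _
  rw [hhalf, hNn]
  have hinit :
      (((PySem.List.pyRepeat [(1 : Int)] ((n : Int) + 1)).toArray ::
        (PySem.List.pyRange 0 (hh : Int) 1).map
          (fun _ => (PySem.List.pyRepeat [(0 : Int)] ((n : Int) + 1)).toArray)).toArray) =
        arr2 (TabF n hh 0) := by
    rw [show ((n : Int) + 1) = ((n + 1 : ℕ) : Int) by push_cast; ring,
        PySem.List.pyRepeat_singleton, PySem.List.pyRepeat_singleton,
        PySem.List.pyRange_zero_natCast, List.map_map]
    unfold arr2 TabF
    rw [← Array.toList_inj]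
    simp only [List.map_cons, List.map_map]
    congr 1
  rw [hinit, outerFold_eq n hh hh le_rfl, tabF_extract]

-- ===== B-side lemmas: Kronecker packing =====

theorem Aent_nonneg (j i : ℕ) : 0 ≤ Aent i j := by
  induction j generalizing i with
  | zero => by_cases h : i = 0 <;> simp [Aent, h]
  | succ j ih =>
      by_cases h : i = 0
      · simp [Aent, h]
      · simp only [Aent, if_neg h]
        have := ih i
        by_cases h2 : j + 1 ≤ i
        · have := ih (i - (j + 1)); simp [h2]; omega
        · simp [h2]; omega

theorem Aent_le (j i : ℕ) : Aent i j ≤ 2 ^ j := by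
  induction j generalizing i with
  | zero => by_cases h : i = 0 <;> simp [Aent, h]
  | succ j ih =>
      by_cases h : i = 0
      · simp [Aent, h]
        have : (0:ℤ) < 2 ^ (j + 1) := by positivity
        omega
      · simp only [Aent, if_neg h]
        have h1 := ih i
        by_cases h2 : j + 1 ≤ i
        · have h3 := ih (i - (j + 1))
          rw [if_pos h2, pow_succ]
          omega
        · rw [if_neg h2, pow_succ]
          have : (0:ℤ) < 2 ^ j := by positivity
          omega

-- coefficients above the full triangle sum vanish
theorem Aent_hi (j i : ℕ) (h : j * (j + 1) / 2 < i) : Aent i j = 0 := by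
  induction j generalizing i with
  | zero =>
      have : i ≠ 0 := by omega
      simp [Aent, this]
  | succ j ih =>
      have e1 : (j + 1) * (j + 1 + 1) = j * (j + 1) + 2 * (j + 1) := by ring
      have hi0 : i ≠ 0 := by omega
      simp only [Aent, if_neg hi0]
      rw [ih i (by omega)]
      by_cases h2 : j + 1 ≤ i
      · rw [if_pos h2, ih (i - (j + 1)) (by omega)]
        ring
      · simp [h2]

-- the low part of a packed integer is below the lane boundary
theorem low_bound (W : ℕ) (c : ℕ → ℤ) (hc0 : ∀ s, 0 ≤ c s) (hc1 : ∀ s, c s < 2 ^ W) :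
    ∀ h : ℕ, 0 ≤ (∑ s ∈ Finset.range h, c s * 2 ^ (W * s)) ∧
      (∑ s ∈ Finset.range h, c s * 2 ^ (W * s)) < 2 ^ (W * h) := by
  intro h
  induction h with
  | zero => simp
  | succ h ih =>
      rw [Finset.sum_range_succ]
      have hterm0 : (0:ℤ) ≤ c h * 2 ^ (W * h) := mul_nonneg (hc0 h) (by positivity)
      have hterm : c h * 2 ^ (W * h) ≤ (2 ^ W - 1) * 2 ^ (W * h) := by
        apply mul_le_mul_of_nonneg_right (by have := hc1 h; omega) (by positivity)
      have hpow : (2:ℤ) ^ (W * (h + 1)) = 2 ^ W * 2 ^ (W * h) := by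
        rw [← pow_add]; ring_nf
      constructor
      · omega
      · have := ih.2
        rw [hpow]
        nlinarith [ih.1, ih.2]

-- reading lane h of a packed integer: (pack >> W*h) % 2^W = c h
theorem extract_lane (W T h : ℕ) (c : ℕ → ℤ)
    (hc0 : ∀ s, 0 ≤ c s) (hc1 : ∀ s, c s < 2 ^ W) (hhT : h ≤ T) :
    (∑ s ∈ Finset.range (T + 1), c s * 2 ^ (W * s)) / 2 ^ (W * h) % 2 ^ W = c h := by
  have hsplit :
      (∑ s ∈ Finset.range (T + 1), c s * 2 ^ (W * s)) =
        (∑ s ∈ Finset.range h, c s * 2 ^ (W * s)) +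
          ∑ s ∈ Finset.Ico h (T + 1), c s * 2 ^ (W * s) := by
    rw [Finset.range_eq_Ico, ← Finset.sum_Ico_consecutive _ (Nat.zero_le h) (by omega)]
  have hico :
      (∑ s ∈ Finset.Ico h (T + 1), c s * 2 ^ (W * s)) =
        2 ^ (W * h) * (c h + 2 ^ W * ∑ t ∈ Finset.range (T - h), c (h + 1 + t) * 2 ^ (W * t)) := by
    rw [Finset.sum_Ico_eq_sum_range]
    rw [show T + 1 - h = (T - h) + 1 by omega, Finset.sum_range_succ']
    have hterm : ∀ t, c (h + (t + 1)) * 2 ^ (W * (h + (t + 1))) =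
        2 ^ (W * h) * (2 ^ W * (c (h + 1 + t) * 2 ^ (W * t))) := by
      intro t
      rw [show h + (t + 1) = h + 1 + t by omega, show W * (h + 1 + t) = W * h + W + W * t by ring,
          pow_add, pow_add]
      ring
    rw [Finset.sum_congr rfl (fun t _ => hterm t), ← Finset.mul_sum, ← Finset.mul_sum]
    simp only [Nat.add_zero]
    ring
  have hrest : 0 ≤ ∑ t ∈ Finset.range (T - h), c (h + 1 + t) * 2 ^ (W * t) :=
    Finset.sum_nonneg (fun t _ => mul_nonneg (hc0 _) (by positivity))
  have hlow := low_bound W c hc0 hc1 h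
  rw [hsplit, hico]
  rw [Int.add_mul_ediv_left _ _ (by positivity : (0:ℤ) < (2:ℤ)^(W*h)).ne',
      Int.ediv_eq_zero_of_lt hlow.1 hlow.2, zero_add,
      Int.add_mul_emod_self_left, Int.emod_eq_of_lt (hc0 h) (hc1 h)]

-- the packed product after m factors
theorem foldB_eq (n : ℕ) :
    ∀ m, m ≤ n →
      (PySem.List.pyRange 1 ((m : Int) + 1) 1).foldl
          (fun (P : Int) k => P + (P <<< ((((n : Int) + 1) * k).toNat))) 1 =
        ∑ s ∈ Finset.range (n * (n + 1) / 2 + 1), Aent s m * 2 ^ ((n + 1) * s) := by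
  intro m
  induction m with
  | zero =>
      intro _
      rw [PySem.List.pyRange_one_eq_nil (by omega)]
      simp only [List.foldl_nil]
      rw [Finset.sum_eq_single 0]
      · simp [Aent_zero_left]
      · intro s _ hs
        obtain ⟨t, rfl⟩ : ∃ t, s = t + 1 := ⟨s - 1, by omega⟩
        rw [Aent_succ_zero]; ring
      · intro h; exact absurd (by simp) h
  | succ m ih =>
      intro hm
      rw [show ((m + 1 : ℕ) : Int) + 1 = ((m : Int) + 1) + 1 by push_cast; ring,
          PySem.List.pyRange_one_succ_right (by omega), List.foldl_append,
          ih (by omega)]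
      simp only [List.foldl_cons, List.foldl_nil]
      set T : ℕ := n * (n + 1) / 2 with hT
      have hsh : ((((n : Int) + 1) * ((m : Int) + 1)).toNat) = (n + 1) * (m + 1) := by
        have : ((n : Int) + 1) * ((m : Int) + 1) = (((n + 1) * (m + 1) : ℕ) : Int) := by
          push_cast; ring
        rw [this, Int.toNat_natCast]
      rw [hsh, Int.shiftLeft_eq]
      -- shifted copy = the convolution column, using that high coefficients vanish
      have hTm : m * (m + 1) / 2 + (m + 1) ≤ T := by
        have e0 : (m + 1) * (m + 2) = m * (m + 1) + 2 * (m + 1) := by ring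
        have h2 : (m + 1) * (m + 2) ≤ n * (n + 1) := by nlinarith
        omega
      have hshift :
          (∑ s ∈ Finset.range (T + 1), Aent s m * 2 ^ ((n + 1) * s)) * 2 ^ ((n + 1) * (m + 1)) =
            ∑ s ∈ Finset.range (T + 1),
              (if m + 1 ≤ s then Aent (s - (m + 1)) m else 0) * 2 ^ ((n + 1) * s) := by
        rw [Finset.sum_mul]
        have hL :
            (∑ s ∈ Finset.range (T + 1), Aent s m * 2 ^ ((n + 1) * s) * 2 ^ ((n + 1) * (m + 1))) =
              ∑ s ∈ Finset.range (T - m), Aent s m * 2 ^ ((n + 1) * (s + (m + 1))) := by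
          rw [← Finset.sum_subset (by intro x hx; simp only [Finset.mem_range] at hx ⊢; omega : Finset.range (T - m) ⊆ Finset.range (T + 1))]
          · exact Finset.sum_congr rfl (fun s _ => by
              rw [show (n + 1) * (s + (m + 1)) = (n + 1) * s + (n + 1) * (m + 1) by ring, pow_add]
              ring)
          · intro s _ hs
            rw [Aent_hi m s (by simp at hs; omega)]
            ring
        have hR :
            (∑ s ∈ Finset.range (T + 1),
                (if m + 1 ≤ s then Aent (s - (m + 1)) m else 0) * 2 ^ ((n + 1) * s)) =
              ∑ s ∈ Finset.range (T - m), Aent s m * 2 ^ ((n + 1) * (s + (m + 1))) := by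
          rw [Finset.range_eq_Ico,
              ← Finset.sum_Ico_consecutive _ (Nat.zero_le (m + 1)) (by omega : m + 1 ≤ T + 1)]
          have hz : (∑ s ∈ Finset.Ico 0 (m + 1),
              (if m + 1 ≤ s then Aent (s - (m + 1)) m else 0) * 2 ^ ((n + 1) * s)) = 0 := by
            apply Finset.sum_eq_zero
            intro s hs
            simp only [Finset.mem_Ico] at hs
            rw [if_neg (by omega)]
            ring
          rw [hz, zero_add, Finset.sum_Ico_eq_sum_range]
          rw [show T + 1 - (m + 1) = T - m by omega, ← Finset.range_eq_Ico]
          apply Finset.sum_congr rfl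
          intro t _
          rw [if_pos (by omega), show m + 1 + t - (m + 1) = t by omega,
              show m + 1 + t = t + (m + 1) by ring]
        rw [hL, hR]
      rw [hshift, ← Finset.sum_add_distrib]
      apply Finset.sum_congr rfl
      intro s _
      rcases Nat.eq_zero_or_pos s with rfl | hs0
      · rw [Aent_zero_left, Aent_zero_left, if_neg (by omega)]
        ring
      · obtain ⟨i, rfl⟩ : ∃ i, s = i + 1 := ⟨s - 1, by omega⟩
        rw [Aent_succ_succ]
        ring

-- Python's  x & ((1 << W) - 1)  on a nonnegative x is  x % 2^W
theorem band_mask (x : Int) (W : ℕ) (hx : 0 ≤ x) :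
    PySem.Int.band x (((1 : Int) <<< W) - 1) = x % 2 ^ W := by
  have hmask : ((1 : Int) <<< W) - 1 = ((2 ^ W - 1 : ℕ) : Int) := by
    rw [Int.shiftLeft_eq]
    have : (1:ℕ) ≤ 2 ^ W := Nat.one_le_two_pow
    push_cast [this]
    ring
  rw [hmask, PySem.Int.band_of_nonneg hx (by positivity)]
  rw [Int.toNat_natCast, Nat.and_two_pow_sub_one_eq_mod]
  rw [show x = ((x.toNat : ℕ) : Int) by omega]
  push_cast
  simp

theorem count_alt_eq_Aent (N : Int) (hN : 0 ≤ N)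
    (he : PySem.Int.mod (PySem.Int.floordiv (N * (N + 1)) 2) 2 = 0) :
    count_alt N =
      PySem.Int.floordiv
        (Aent (PySem.Int.floordiv (PySem.Int.floordiv (N * (N + 1)) 2) 2).toNat N.toNat) 2 := by
  have hcond : ¬ (PySem.Int.mod (PySem.Int.floordiv (N * (N + 1)) 2) 2 ≠ 0) := not_not_intro he
  unfold count_alt
  rw [if_neg hcond]
  set n : ℕ := N.toNat with hn
  set hh : ℕ := (PySem.Int.floordiv (PySem.Int.floordiv (N * (N + 1)) 2) 2).toNat with hhh
  have hNn : N = (n : Int) := by omega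
  set T : ℕ := n * (n + 1) / 2 with hT
  have htot : PySem.Int.floordiv (N * (N + 1)) 2 = ((T : ℕ) : Int) := by
    rw [hNn, show ((n : Int)) * ((n : Int) + 1) = ((n * (n + 1) : ℕ) : Int) by push_cast; ring,
        show (2 : Int) = ((2 : ℕ) : Int) by norm_num, PySem.Int.floordiv_natCast]
  have hhalf : PySem.Int.floordiv (PySem.Int.floordiv (N * (N + 1)) 2) 2 = ((T / 2 : ℕ) : Int) := by
    rw [htot, show (2 : Int) = ((2 : ℕ) : Int) by norm_num, PySem.Int.floordiv_natCast]
  have hhhT : hh = T / 2 := by omega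
  have hhle : hh ≤ T := by rw [hhhT]; exact Nat.div_le_self _ _
  show PySem.Int.floordiv
      (PySem.Int.band
        (((PySem.List.pyRange 1 (N + 1) 1).foldl
            (fun (P : Int) k => P + (P <<< (((N + 1) * k).toNat))) 1) >>>
          (((N + 1) * PySem.Int.floordiv (PySem.Int.floordiv (N * (N + 1)) 2) 2).toNat))
        (((1 : Int) <<< (N + 1).toNat) - 1)) 2 = _
  rw [hhalf, hNn]
  rw [foldB_eq n n le_rfl]
  set P : ℤ := ∑ s ∈ Finset.range (T + 1), Aent s n * 2 ^ ((n + 1) * s) with hP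
  have hPnn : 0 ≤ P := by
    exact Finset.sum_nonneg (fun s _ => mul_nonneg (Aent_nonneg n s) (by positivity))
  have hsh : (((n : Int) + 1) * ((T / 2 : ℕ) : Int)).toNat = (n + 1) * hh := by
    rw [hhhT]
    have : ((n : Int) + 1) * ((T / 2 : ℕ) : Int) = (((n + 1) * (T / 2) : ℕ) : Int) := by
      push_cast; ring
    rw [this, Int.toNat_natCast]
  have hWt : ((n : Int) + 1).toNat = n + 1 := by omega
  rw [hsh, hWt]
  have hshr : P >>> ((n + 1) * hh) = P / 2 ^ ((n + 1) * hh) := by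
    rw [Int.shiftRight_eq_div_pow]
    push_cast
    rfl
  rw [hshr, band_mask _ _ (Int.ediv_nonneg hPnn (by positivity))]
  rw [hP, extract_lane (n + 1) T hh (fun s => Aent s n)
        (fun s => Aent_nonneg n s)
        (fun s => lt_of_le_of_lt (Aent_le n s) (by
          have : (2:ℤ) ^ n < 2 ^ (n + 1) := by
            rw [pow_succ]
            have : (0:ℤ) < 2 ^ n := by positivity
            omega
          exact this))
        hhle]

theorem count_odd (N : Int)
    (he : ¬ PySem.Int.mod (PySem.Int.floordiv (N * (N + 1)) 2) 2 = 0) : count N = 0 := by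
  unfold count
  show (if PySem.Int.mod (PySem.Int.floordiv (N * (N + 1)) 2) 2 ≠ 0 then (0 : ℤ) else _) = 0
  rw [if_pos he]

theorem count_alt_odd (N : Int)
    (he : ¬ PySem.Int.mod (PySem.Int.floordiv (N * (N + 1)) 2) 2 = 0) : count_alt N = 0 := by
  unfold count_alt
  show (if PySem.Int.mod (PySem.Int.floordiv (N * (N + 1)) 2) 2 ≠ 0 then (0 : ℤ) else _) = 0
  rw [if_pos he]

-- ===== VERDICT (by name: the statement is the Claim_ definition above) =====
theorem count_spec : Claim_equal_count := by
  intro N _ hpre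
  unfold Spec_count
  by_cases he : PySem.Int.mod (PySem.Int.floordiv (N * (N + 1)) 2) 2 = 0
  · have hN : 0 ≤ N := by
      rcases hpre with h | h
      · exact h
      · exact absurd he h
    rw [count_eq_Aent N hN he, count_alt_eq_Aent N hN he]
  · rw [count_odd N he, count_alt_odd N he]
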